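-- pv_equiv track=rewrite | github.com/muneeb706/Algorithms | dynamic_programming/smooth-shuffle-of-two-strings.py | is_smooth_shuffle
-- ===== SOURCE A (Python) =====
-- def is_smooth_shuffle(a, b, c):
--     if len(a) + len(b) != len(c):
--         return False
--     temp_matrix = [[False for i in range(len(b) + 1)] for j in range(len(a) + 1)]
--     temp_matrix[0][0] = True
--     i = 1
--     while i < len(a) + 1:
--         temp_matrix[i][0] = temp_matrix[i - 1][0] and (a[i - 1] == c[i - 1] and (not (a[i - 2] == c[i - 2]
--                                                                                       and a[i - 3] == c[
--                                                                                           i - 3]) if i > 2 else True))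
--         i = i + 1
--     j = 1
--     while j < len(b) + 1:
--         temp_matrix[0][j] = temp_matrix[0][j - 1] and (b[j - 1] == c[j - 1] and (not (b[j - 2] == c[j - 2]
--                                                                                       and b[j - 3] == c[
--                                                                                           j - 3]) if j > 2 else True))
--         j = j + 1
--
--     i = 1
--     while i < len(a) + 1:
--         j = 1
--         while j < len(b) + 1:
--             temp_matrix[i][j] = (((c[i + j - 1] == a[i - 1])
--                                   and (
--                                       not (a[i - 2] == c[i + j - 2] and a[i - 3] == c[
--                                           i + j - 3]) if i > 2 else True) and
--                                   temp_matrix[i - 1][j])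
--                                  or ((c[i + j - 1] == b[j - 1])
--                                      and (not (
--                                     b[j - 2] == c[i + j - 2] and b[j - 3] == c[i + j - 3]) if j > 2 else True) and
--                                      temp_matrix[i][j - 1]))
--             j = j + 1
--         i = i + 1
--
--     return temp_matrix[len(a)][len(b)]
-- ===== SOURCE B (Python) =====
-- def is_smooth_shuffle(a, b, c):
--     # Forward reachable-set simulation: after consuming d characters of c,
--     # cur holds every i such that a[:i] and b[:d-i] smooth-shuffle c[:d].
--     la, lb = len(a), len(b)
--     if la + lb != len(c):
--         return False
--     cur = {0}
--     for d in range(len(c)):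
--         nxt = set()
--         for i in cur:
--             j = d - i
--             if i < la and a[i] == c[d] and not (i >= 2 and a[i - 1] == c[d - 1] and a[i - 2] == c[d - 2]):
--                 nxt.add(i + 1)
--             if j < lb and b[j] == c[d] and not (j >= 2 and b[j - 1] == c[d - 1] and b[j - 2] == c[d - 2]):
--                 nxt.add(i)
--         cur = nxt
--     return la in cur
-- ===== Notes on version B (the rewrite author's own statement) =====
-- stated objective: alternative
-- what changed: B replaces A's bottom-up fill of the full (la+1)x(lb+1) boolean table with a forward reachable-state simulation: one pass over c maintaining the frontier set of feasible a-prefix lengths i (an NFA-style subset construction), finishing with a membership test 'la in cur'.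
import Mathlib
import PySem

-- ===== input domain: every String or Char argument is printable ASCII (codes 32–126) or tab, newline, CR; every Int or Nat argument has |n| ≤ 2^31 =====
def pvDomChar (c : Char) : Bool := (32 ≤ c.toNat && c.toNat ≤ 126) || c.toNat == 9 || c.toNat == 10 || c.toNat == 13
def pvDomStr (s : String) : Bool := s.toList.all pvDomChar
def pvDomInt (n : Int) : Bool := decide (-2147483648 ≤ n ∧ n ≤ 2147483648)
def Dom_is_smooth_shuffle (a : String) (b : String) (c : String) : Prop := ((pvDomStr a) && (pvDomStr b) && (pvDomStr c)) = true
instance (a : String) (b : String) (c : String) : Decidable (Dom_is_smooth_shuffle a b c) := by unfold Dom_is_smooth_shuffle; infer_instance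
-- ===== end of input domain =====

-- B replaces A's three-loop full (la+1)×(lb+1) DP table with a forward reachable-state
-- (frontier-set) simulation: one pass over c propagating the set of feasible a-prefix lengths.

-- ===== PORT A =====
-- shared character access s[n]; on every admitted input each use is within range
-- (the length guard ensures len(c) = len(a)+len(b)), so Python's s[n] never raises here
def chAt (l : List Char) (n : Nat) : Char := l.getD n ' '

-- A's first while loop: temp_matrix[i][0]  (i = succ of the recursion argument)
def colA (a c : List Char) : Nat → Bool
  | 0 => true
  | i+1 => colA a c i && ((chAt a i == chAt c i) &&
      (if i+1 > 2 then !((chAt a (i-1) == chAt c (i-1)) && (chAt a (i-2) == chAt c (i-2))) else true))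

-- A's second while loop: row 0 of the matrix, built left to right ([0][j] for j = 0..lb)
def row0A (b c : List Char) (lb : Nat) : List Bool :=
  (List.range lb).foldl (fun row jm =>
    row ++ [row.getD jm false && ((chAt b jm == chAt c jm) &&
      (if jm+1 > 2 then !((chAt b (jm-1) == chAt c (jm-1)) && (chAt b (jm-2) == chAt c (jm-2))) else true))]) [true]

-- A's inner while loop: row i of the matrix (i ≥ 1) from row i-1 (prev), entry 0 = temp_matrix[i][0]
def rowStepA (a b c : List Char) (lb : Nat) (prev : List Bool) (i : Nat) : List Bool :=
  (List.range lb).foldl (fun row jm =>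
    row ++ [((chAt c (i + (jm+1) - 1) == chAt a (i-1)) &&
             (if i > 2 then !((chAt a (i-2) == chAt c (i + (jm+1) - 2)) && (chAt a (i-3) == chAt c (i + (jm+1) - 3))) else true) &&
             prev.getD (jm+1) false)
            ||
            ((chAt c (i + (jm+1) - 1) == chAt b jm) &&
             (if jm+1 > 2 then !((chAt b (jm-1) == chAt c (i + (jm+1) - 2)) && (chAt b (jm-2) == chAt c (i + (jm+1) - 3))) else true) &&
             row.getD jm false)]) [colA a c i]

def is_smooth_shuffle (a : String) (b : String) (c : String) : Bool :=
  if a.toList.length + b.toList.length ≠ c.toList.length then false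
  else ((List.range a.toList.length).foldl
          (fun prev im => rowStepA a.toList b.toList c.toList b.toList.length prev (im+1))
          (row0A b.toList c.toList b.toList.length)).getD b.toList.length false

-- ===== PORT B =====
-- Source B's condition for taking a[i] at position d of c (the 'if i < la and …' guard)
def transA (a c : List Char) (la d i : Nat) : Bool :=
  decide (i < la) && (chAt a i == chAt c d) &&
  !(decide (2 ≤ i) && (chAt a (i-1) == chAt c (d-1)) && (chAt a (i-2) == chAt c (d-2)))

-- Source B's condition for taking b[j] (j = d - i) at position d of c
def transB (b c : List Char) (lb d i : Nat) : Bool :=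
  decide (d - i < lb) && (chAt b (d-i) == chAt c d) &&
  !(decide (2 ≤ d - i) && (chAt b (d-i-1) == chAt c (d-1)) && (chAt b (d-i-2) == chAt c (d-2)))

-- Source B's loop body: the two conditional set-adds for one frontier element i
def stepOne (a b c : List Char) (la lb d : Nat) (nxt : List Nat) (i : Nat) : PySem.Set Nat :=
  let nxt1 := if transA a c la d i then PySem.Set.add nxt (i+1) else nxt
  if transB b c lb d i then PySem.Set.add nxt1 i else nxt1

-- Source B's inner loop: build nxt from the current frontier cur (a Python set of ints)
def stepB (a b c : List Char) (la lb d : Nat) (cur : List Nat) : PySem.Set Nat :=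
  cur.foldl (stepOne a b c la lb d) PySem.Set.empty

def is_smooth_shuffle_alt (a : String) (b : String) (c : String) : Bool :=
  let la := a.toList.length
  let lb := b.toList.length
  if la + lb ≠ c.toList.length then false
  else decide (la ∈ (List.range c.toList.length).foldl
        (fun cur d => stepB a.toList b.toList c.toList la lb d cur)
        (PySem.Set.ofList [0]))

-- ===== PRECONDITION & SPEC =====
def Spec_is_smooth_shuffle (a : String) (b : String) (c : String) (out : Bool) : Prop := out = is_smooth_shuffle_alt a b c
instance (a : String) (b : String) (c : String) (out : Bool) : Decidable (Spec_is_smooth_shuffle a b c out) := by unfold Spec_is_smooth_shuffle; infer_instance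

-- ===== CLAIM (what is proved, stated in full; the proofs are below) =====
def Claim_equal_is_smooth_shuffle : Prop := ∀ (a : String) (b : String) (c : String), Dom_is_smooth_shuffle a b c → Spec_is_smooth_shuffle a b c (is_smooth_shuffle a b c)

-- ===== LEMMAS AND PROOFS =====

-- the common recurrence: F a b c i j = "a[:i] and b[:j] smooth-shuffle c[:i+j]"
def F (a b c : List Char) : Nat → Nat → Bool
  | 0, 0 => true
  | i+1, 0 => F a b c i 0 && ((chAt a i == chAt c i) &&
      (if i+1 > 2 then !((chAt a (i-1) == chAt c (i-1)) && (chAt a (i-2) == chAt c (i-2))) else true))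
  | 0, j+1 => F a b c 0 j && ((chAt b j == chAt c j) &&
      (if j+1 > 2 then !((chAt b (j-1) == chAt c (j-1)) && (chAt b (j-2) == chAt c (j-2))) else true))
  | i+1, j+1 =>
      ((chAt c ((i+1) + (j+1) - 1) == chAt a i) &&
       (if i+1 > 2 then !((chAt a (i-1) == chAt c ((i+1) + (j+1) - 2)) && (chAt a (i-2) == chAt c ((i+1) + (j+1) - 3))) else true) &&
       F a b c i (j+1))
      ||
      ((chAt c ((i+1) + (j+1) - 1) == chAt b j) &&
       (if j+1 > 2 then !((chAt b (j-1) == chAt c ((i+1) + (j+1) - 2)) && (chAt b (j-2) == chAt c ((i+1) + (j+1) - 3))) else true) &&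
       F a b c (i+1) j)
termination_by i j => (i, j)

-- the value sequence of one append-building loop
def iterC (init : Bool) (f : Nat → Bool → Bool) : Nat → Bool
  | 0 => init
  | k+1 => f k (iterC init f k)

theorem getD_concat (l : List Bool) (v : Bool) (j : Nat) (h : l.length = j) :
    (l ++ [v]).getD j false = v := by subst h; simp [List.getD]

theorem build_len (init : Bool) (f : Nat → Bool → Bool) (n : Nat) :
    ((List.range n).foldl (fun r k => r ++ [f k (r.getD k false)]) [init]).length = n + 1 := by
  induction n with
  | zero => rfl
  | succ n ih =>
    rw [List.range_succ, List.foldl_append, List.foldl_cons, List.foldl_nil,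
        List.length_append, ih]
    rfl

theorem build_getD (init : Bool) (f : Nat → Bool → Bool) :
    ∀ (n j : Nat), j ≤ n →
      ((List.range n).foldl (fun r k => r ++ [f k (r.getD k false)]) [init]).getD j false
        = iterC init f j := by
  intro n
  induction n with
  | zero =>
    intro j h
    have hj0 : j = 0 := Nat.le_zero.mp h
    subst hj0; rfl
  | succ n ih =>
    intro j hj
    rw [List.range_succ, List.foldl_append, List.foldl_cons, List.foldl_nil]
    rcases Nat.lt_or_ge j (n+1) with h1 | h1
    · rw [List.getD_append _ _ _ _ (by rw [build_len]; exact h1)]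
      exact ih j (Nat.lt_succ_iff.mp h1)
    · have hjn : j = n + 1 := le_antisymm hj h1
      subst hjn
      rw [getD_concat _ _ _ (build_len init f n), ih n (Nat.le_refl n)]
      rfl

-- ===== A side: the rows of A's matrix tabulate F =====

theorem colA_eq (a b c : List Char) : ∀ i, colA a c i = F a b c i 0 := by
  intro i
  induction i with
  | zero => rw [F]; rfl
  | succ i ih => rw [colA, ih, F]

theorem row0A_getD (a b c : List Char) (lb : Nat) :
    ∀ j, j ≤ lb → (row0A b c lb).getD j false = F a b c 0 j := by
  have key : ∀ j, iterC true
      (fun k p => p && ((chAt b k == chAt c k) &&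
        (if k+1 > 2 then !((chAt b (k-1) == chAt c (k-1)) && (chAt b (k-2) == chAt c (k-2))) else true))) j
      = F a b c 0 j := by
    intro j
    induction j with
    | zero => rw [F]; rfl
    | succ j ih => rw [iterC, ih, F]
  intro j hj
  have h2 : (row0A b c lb).getD j false = iterC true
      (fun k p => p && ((chAt b k == chAt c k) &&
        (if k+1 > 2 then !((chAt b (k-1) == chAt c (k-1)) && (chAt b (k-2) == chAt c (k-2))) else true))) j :=
    build_getD true
      (fun k p => p && ((chAt b k == chAt c k) &&
        (if k+1 > 2 then !((chAt b (k-1) == chAt c (k-1)) && (chAt b (k-2) == chAt c (k-2))) else true))) lb j hj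
  rw [h2, key j]

theorem rowStepA_getD (a b c : List Char) (lb : Nat) (prev : List Bool) (im : Nat)
    (hprev : ∀ j, j ≤ lb → prev.getD j false = F a b c im j) :
    ∀ j, j ≤ lb → (rowStepA a b c lb prev (im+1)).getD j false = F a b c (im+1) j := by
  have key : ∀ j, j ≤ lb → iterC (colA a c (im+1))
      (fun k p =>
        ((chAt c ((im+1) + (k+1) - 1) == chAt a ((im+1)-1)) &&
         (if im+1 > 2 then !((chAt a ((im+1)-2) == chAt c ((im+1) + (k+1) - 2)) && (chAt a ((im+1)-3) == chAt c ((im+1) + (k+1) - 3))) else true) &&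
         prev.getD (k+1) false)
        ||
        ((chAt c ((im+1) + (k+1) - 1) == chAt b k) &&
         (if k+1 > 2 then !((chAt b (k-1) == chAt c ((im+1) + (k+1) - 2)) && (chAt b (k-2) == chAt c ((im+1) + (k+1) - 3))) else true) &&
         p)) j
      = F a b c (im+1) j := by
    intro j hj
    induction j with
    | zero => exact colA_eq a b c (im+1)
    | succ j ih =>
      rw [iterC, ih (Nat.le_of_succ_le hj), hprev (j+1) hj, F]
      rfl
  intro j hj
  have h2 : (rowStepA a b c lb prev (im+1)).getD j false = iterC (colA a c (im+1))
      (fun k p =>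
        ((chAt c ((im+1) + (k+1) - 1) == chAt a ((im+1)-1)) &&
         (if im+1 > 2 then !((chAt a ((im+1)-2) == chAt c ((im+1) + (k+1) - 2)) && (chAt a ((im+1)-3) == chAt c ((im+1) + (k+1) - 3))) else true) &&
         prev.getD (k+1) false)
        ||
        ((chAt c ((im+1) + (k+1) - 1) == chAt b k) &&
         (if k+1 > 2 then !((chAt b (k-1) == chAt c ((im+1) + (k+1) - 2)) && (chAt b (k-2) == chAt c ((im+1) + (k+1) - 3))) else true) &&
         p)) j :=
    build_getD (colA a c (im+1))
      (fun k p =>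
        ((chAt c ((im+1) + (k+1) - 1) == chAt a ((im+1)-1)) &&
         (if im+1 > 2 then !((chAt a ((im+1)-2) == chAt c ((im+1) + (k+1) - 2)) && (chAt a ((im+1)-3) == chAt c ((im+1) + (k+1) - 3))) else true) &&
         prev.getD (k+1) false)
        ||
        ((chAt c ((im+1) + (k+1) - 1) == chAt b k) &&
         (if k+1 > 2 then !((chAt b (k-1) == chAt c ((im+1) + (k+1) - 2)) && (chAt b (k-2) == chAt c ((im+1) + (k+1) - 3))) else true) &&
         p)) lb j hj
  rw [h2]
  exact key j hj

theorem rowsA (a b c : List Char) (lb : Nat) :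
    ∀ n j, j ≤ lb →
      ((List.range n).foldl (fun prev im => rowStepA a b c lb prev (im+1)) (row0A b c lb)).getD j false
        = F a b c n j := by
  intro n
  induction n with
  | zero => exact row0A_getD a b c lb
  | succ n ih =>
    intro j hj
    rw [List.range_succ, List.foldl_append, List.foldl_cons, List.foldl_nil]
    exact rowStepA_getD a b c lb _ n ih j hj

-- ===== B side: the frontier sets tabulate F =====

-- F's conditions as standalone take-steps (d = index in c being consumed)
def tA (a c : List Char) (d i : Nat) : Bool :=
  (chAt c d == chAt a i) &&
  (if i+1 > 2 then !((chAt a (i-1) == chAt c (d-1)) && (chAt a (i-2) == chAt c (d-2))) else true)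

def tB (b c : List Char) (d j : Nat) : Bool :=
  (chAt c d == chAt b j) &&
  (if j+1 > 2 then !((chAt b (j-1) == chAt c (d-1)) && (chAt b (j-2) == chAt c (d-2))) else true)

theorem F_succ_zero (a b c : List Char) (i : Nat) :
    F a b c (i+1) 0 = (F a b c i 0 && tA a c i i) := by
  rw [F, tA, show (chAt a i == chAt c i) = (chAt c i == chAt a i) from Bool.beq_comm]

theorem F_zero_succ (a b c : List Char) (j : Nat) :
    F a b c 0 (j+1) = (F a b c 0 j && tB b c j j) := by
  rw [F, tB, show (chAt b j == chAt c j) = (chAt c j == chAt b j) from Bool.beq_comm]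

theorem F_succ_succ (a b c : List Char) (i j : Nat) :
    F a b c (i+1) (j+1)
      = ((tA a c (i+j+1) i && F a b c i (j+1)) || (tB b c (i+j+1) j && F a b c (i+1) j)) := by
  rw [F, tA, tB,
      show (i+1) + (j+1) - 1 = i+j+1 from by omega,
      show (i+1) + (j+1) - 2 = (i+j+1) - 1 from by omega,
      show (i+1) + (j+1) - 3 = (i+j+1) - 2 from by omega]

theorem transA_eq (a c : List Char) (la d i : Nat) :
    transA a c la d i = (decide (i < la) && tA a c d i) := by
  rw [transA, tA, show (chAt c d == chAt a i) = (chAt a i == chAt c d) from Bool.beq_comm]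
  by_cases hi : 2 ≤ i
  · rw [if_pos (by omega : i+1 > 2), decide_eq_true hi]
    simp [Bool.and_assoc]
  · rw [if_neg (by omega : ¬ i+1 > 2), decide_eq_false hi]
    simp [Bool.and_assoc]

theorem transB_eq (b c : List Char) (lb d i : Nat) :
    transB b c lb d i = (decide (d - i < lb) && tB b c d (d-i)) := by
  rw [transB, tB, show (chAt c d == chAt b (d-i)) = (chAt b (d-i) == chAt c d) from Bool.beq_comm]
  by_cases hj : 2 ≤ d - i
  · rw [if_pos (by omega : d-i+1 > 2), decide_eq_true hj]
    simp [Bool.and_assoc]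
  · rw [if_neg (by omega : ¬ d-i+1 > 2), decide_eq_false hj]
    simp [Bool.and_assoc]

theorem mem_stepOne (a b c : List Char) (la lb d : Nat) (acc : List Nat) (i y : Nat) :
    y ∈ stepOne a b c la lb d acc i
      ↔ y ∈ acc ∨ (transA a c la d i = true ∧ y = i+1) ∨ (transB b c lb d i = true ∧ y = i) := by
  rw [stepOne]
  split_ifs with h1 h2 h2 <;>
    simp [PySem.Set.mem_add, h1, h2] <;> tauto

theorem mem_stepB (a b c : List Char) (la lb d : Nat) (cur : List Nat) (x : Nat) :
    x ∈ stepB a b c la lb d cur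
      ↔ ∃ i ∈ cur, (transA a c la d i = true ∧ x = i+1) ∨ (transB b c lb d i = true ∧ x = i) := by
  have gen : ∀ (l acc : List Nat),
      x ∈ l.foldl (stepOne a b c la lb d) acc
      ↔ x ∈ acc ∨ ∃ i ∈ l, (transA a c la d i = true ∧ x = i+1) ∨ (transB b c lb d i = true ∧ x = i) := by
    intro l
    induction l with
    | nil => intro acc; simp
    | cons hd tl ih =>
      intro acc
      rw [List.foldl_cons, ih, mem_stepOne]
      constructor
      · rintro ((hx | hx) | ⟨i, hi, hp⟩)
        · exact Or.inl hx
        · exact Or.inr ⟨hd, List.mem_cons_self, hx⟩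
        · exact Or.inr ⟨i, List.mem_cons_of_mem _ hi, hp⟩
      · rintro (hx | ⟨i, hi, hp⟩)
        · exact Or.inl (Or.inl hx)
        · rcases List.mem_cons.mp hi with rfl | hitl
          · exact Or.inl (Or.inr hp)
          · exact Or.inr ⟨i, hitl, hp⟩
  rw [stepB, gen]
  simp [PySem.Set.empty]

-- the frontier after consuming d characters holds exactly the i with F i (d-i) true (within bounds)
theorem step_char (a b c : List Char) (la lb d : Nat) (cur : List Nat)
    (h : ∀ i, i ∈ cur ↔ (i ≤ d ∧ i ≤ la ∧ d - i ≤ lb ∧ F a b c i (d-i) = true)) :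
    ∀ x, x ∈ stepB a b c la lb d cur
      ↔ (x ≤ d+1 ∧ x ≤ la ∧ d+1-x ≤ lb ∧ F a b c x (d+1-x) = true) := by
  intro x
  rw [mem_stepB]
  constructor
  · rintro ⟨i, hi, hcase⟩
    rw [h] at hi
    obtain ⟨hid, hila, hjb, hF⟩ := hi
    rcases hcase with ⟨hta, rfl⟩ | ⟨htb, rfl⟩
    · rw [transA_eq, Bool.and_eq_true, decide_eq_true_eq] at hta
      obtain ⟨hlt, htA⟩ := hta
      refine ⟨by omega, by omega, by omega, ?_⟩
      rcases Nat.eq_zero_or_pos (d - i) with h0 | hpos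
      · have hde : d = i := by omega
        subst hde
        rw [show d+1-(d+1) = 0 from by omega, F_succ_zero,
            show (d:Nat) - d = 0 from by omega] at *
        rw [hF, htA]
        rfl
      · obtain ⟨j, hj⟩ : ∃ j, d - i = j + 1 := ⟨d-i-1, by omega⟩
        rw [show d+1-(i+1) = d-i from by omega, hj, F_succ_succ,
            show i+j+1 = d from by omega, htA,
            show F a b c i (j+1) = true from hj ▸ hF]
        rfl
    · rw [transB_eq, Bool.and_eq_true, decide_eq_true_eq] at htb
      obtain ⟨hlt, htB⟩ := htb
      refine ⟨by omega, hila, by omega, ?_⟩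
      rw [show d+1-x = (d-x)+1 from by omega]
      cases x with
      | zero =>
        simp only [Nat.sub_zero] at hF htB ⊢
        rw [F_zero_succ, hF, htB]
        rfl
      | succ i' =>
        rw [F_succ_succ, show i' + (d - (i'+1)) + 1 = d from by omega, htB, hF]
        simp
  · rintro ⟨hxd, hxla, hjb, hF⟩
    cases x with
    | zero =>
      simp only [Nat.sub_zero] at hF hjb
      rw [F_zero_succ, Bool.and_eq_true] at hF
      refine ⟨0, ?_, Or.inr ⟨?_, rfl⟩⟩
      · rw [h]
        exact ⟨Nat.zero_le d, Nat.zero_le la, by omega, by simpa using hF.1⟩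
      · rw [transB_eq, Bool.and_eq_true]
        exact ⟨decide_eq_true (by omega), by simpa using hF.2⟩
    | succ x' =>
      rcases Nat.lt_or_ge x' d with hx' | hx'
      · have hrw : d+1-(x'+1) = (d-x'-1)+1 := by omega
        rw [hrw, F_succ_succ, show x' + (d-x'-1) + 1 = d from by omega, Bool.or_eq_true,
            Bool.and_eq_true, Bool.and_eq_true] at hF
        rcases hF with ⟨htA, hFpred⟩ | ⟨htB, hFpred⟩
        · refine ⟨x', ?_, Or.inl ⟨?_, rfl⟩⟩
          · rw [h]
            refine ⟨by omega, by omega, by omega, ?_⟩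
            rw [show d - x' = (d-x'-1)+1 from by omega]
            exact hFpred
          · rw [transA_eq, Bool.and_eq_true]
            exact ⟨decide_eq_true (by omega), htA⟩
        · refine ⟨x'+1, ?_, Or.inr ⟨?_, rfl⟩⟩
          · rw [h]
            refine ⟨by omega, hxla, by omega, ?_⟩
            rw [show d - (x'+1) = d-x'-1 from by omega]
            exact hFpred
          · rw [transB_eq, Bool.and_eq_true]
            exact ⟨decide_eq_true (by omega),
              by rw [show d - (x'+1) = d-x'-1 from by omega]; exact htB⟩
      · have hxe : x' = d := by omega
        subst hxe
        rw [show x'+1-(x'+1) = 0 from by omega, F_succ_zero, Bool.and_eq_true] at hF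
        refine ⟨x', ?_, Or.inl ⟨?_, rfl⟩⟩
        · rw [h]
          exact ⟨le_refl x', by omega, by omega, by rw [Nat.sub_self]; exact hF.1⟩
        · rw [transA_eq, Bool.and_eq_true]
          exact ⟨decide_eq_true (by omega), hF.2⟩

theorem reach_all (a b c : List Char) (la lb : Nat) :
    ∀ d x, x ∈ (List.range d).foldl (fun cur e => stepB a b c la lb e cur) (PySem.Set.ofList [0])
      ↔ (x ≤ d ∧ x ≤ la ∧ d - x ≤ lb ∧ F a b c x (d-x) = true) := by
  intro d
  induction d with
  | zero =>
    intro x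
    constructor
    · intro hx
      simp only [List.range_zero, List.foldl_nil] at hx
      have hx0 : x = 0 := by simpa [PySem.Set.ofList] using hx
      subst hx0
      exact ⟨le_refl 0, Nat.zero_le la, by omega, by rw [F]⟩
    · rintro ⟨h1, -, -, -⟩
      have hx0 : x = 0 := Nat.le_zero.mp h1
      subst hx0
      simp [PySem.Set.ofList]
  | succ d ih =>
    intro x
    rw [List.range_succ, List.foldl_append, List.foldl_cons, List.foldl_nil]
    exact step_char a b c la lb d _ ih x

theorem main_eq (a b c : String) : is_smooth_shuffle a b c = is_smooth_shuffle_alt a b c := by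
  have halt : is_smooth_shuffle_alt a b c
      = (if a.toList.length + b.toList.length ≠ c.toList.length then false
         else decide (a.toList.length ∈ (List.range c.toList.length).foldl
            (fun cur d => stepB a.toList b.toList c.toList a.toList.length b.toList.length d cur)
            (PySem.Set.ofList [0]))) := rfl
  rw [halt]
  unfold is_smooth_shuffle
  split_ifs with h
  · rfl
  · have he : a.toList.length + b.toList.length = c.toList.length := by omega
    rw [rowsA a.toList b.toList c.toList b.toList.length a.toList.length b.toList.length (Nat.le_refl _)]
    have hmem := reach_all a.toList b.toList c.toList a.toList.length b.toList.length
      c.toList.length a.toList.length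
    cases hF : F a.toList b.toList c.toList a.toList.length b.toList.length with
    | false =>
      have hnot : ¬ (a.toList.length ∈ (List.range c.toList.length).foldl
          (fun cur d => stepB a.toList b.toList c.toList a.toList.length b.toList.length d cur)
          (PySem.Set.ofList [0])) := by
        rw [hmem]
        rintro ⟨-, -, -, hFt⟩
        rw [show c.toList.length - a.toList.length = b.toList.length from by omega, hF] at hFt
        cases hFt
      rw [decide_eq_false hnot]
    | true =>
      have hyes : a.toList.length ∈ (List.range c.toList.length).foldl
          (fun cur d => stepB a.toList b.toList c.toList a.toList.length b.toList.length d cur)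
          (PySem.Set.ofList [0]) :=
        hmem.mpr ⟨by omega, le_refl _, by omega,
          by rw [show c.toList.length - a.toList.length = b.toList.length from by omega]; exact hF⟩
      rw [decide_eq_true hyes]

-- ===== VERDICT (by name: the statement is the Claim_ definition above) =====
theorem is_smooth_shuffle_spec : Claim_equal_is_smooth_shuffle := by
  intro a b c _
  exact main_eq a b c
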